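-- pv_equiv track=rewrite | github.com/emilyvroth/cs1 | lab/lab0/three_doubles.py | three_double_two_between
-- ===== SOURCE A (Python) =====
-- def three_double_two_between(word):
-- 	"""
-- 	Returns True if the word contains three pairs of double letters
-- 	seperated by two letters (it is assumed that the letters consecutive
-- 	to the pairs of doubles cannot equal the same letter as the pair)
-- 	"""
-- 	for l in range(len(word)-9):
-- 		if word[l] == word[l+1] and word[l+1] != word[l+2] and \
-- 				word[l+2] != word[l+3] and word[l+3] != word[l+4] and \
-- 				word[l+4] == word[l+5] and word[l+5] != word[l+6] and \
-- 				word[l+6] != word[l+7] and word[l+7] != word[l+8] and \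
-- 				word[l+8] == word[l+9]:
-- 			return True
-- 	return False
-- ===== SOURCE B (Python) =====
-- def three_double_two_between(word):
--     """
--     Anchor-set approach: collect positions of double letters once, then for
--     each anchor i check that i+4 and i+8 are anchors too and the separating
--     letters all differ from their neighbours.
--     """
--     n = len(word)
--     anchor_list = [i for i in range(n - 1) if word[i] == word[i + 1]]
--     anchors = set(anchor_list)
--     for i in anchor_list:
--         if i + 4 in anchors and i + 8 in anchors and \
--                 word[i + 1] != word[i + 2] and word[i + 2] != word[i + 3] and \
--                 word[i + 3] != word[i + 4] and word[i + 5] != word[i + 6] and \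
--                 word[i + 6] != word[i + 7] and word[i + 7] != word[i + 8]:
--             return True
--     return False
-- ===== Notes on version B (the rewrite author's own statement) =====
-- stated objective: alternative
-- what changed: B first builds the set of double-letter anchor positions in one pass, then checks only those anchors for companions at i+4 and i+8 plus the neighbour-inequality conditions, instead of A's single scan testing nine inline comparisons at every index.
import Mathlib
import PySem

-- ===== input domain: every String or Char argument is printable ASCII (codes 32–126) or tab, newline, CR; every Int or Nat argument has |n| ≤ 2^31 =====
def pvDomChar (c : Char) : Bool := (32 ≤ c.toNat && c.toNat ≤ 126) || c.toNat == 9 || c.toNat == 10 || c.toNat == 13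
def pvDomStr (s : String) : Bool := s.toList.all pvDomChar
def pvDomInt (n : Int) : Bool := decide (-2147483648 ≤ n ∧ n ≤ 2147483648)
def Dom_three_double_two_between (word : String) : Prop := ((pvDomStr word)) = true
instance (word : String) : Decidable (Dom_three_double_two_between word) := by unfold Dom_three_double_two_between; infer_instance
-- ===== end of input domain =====

-- B restructures A: it precomputes the double-letter anchor positions and scans only those; same results.

-- ===== PORT A =====
-- the nine-comparison test A performs at index l (all indices in range whenever A reaches them)
def pvCondA (cs : List Char) (l : Int) : Bool :=
  (PySem.List.pyGetD cs l ' ' == PySem.List.pyGetD cs (l+1) ' ') &&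
  (PySem.List.pyGetD cs (l+1) ' ' != PySem.List.pyGetD cs (l+2) ' ') &&
  (PySem.List.pyGetD cs (l+2) ' ' != PySem.List.pyGetD cs (l+3) ' ') &&
  (PySem.List.pyGetD cs (l+3) ' ' != PySem.List.pyGetD cs (l+4) ' ') &&
  (PySem.List.pyGetD cs (l+4) ' ' == PySem.List.pyGetD cs (l+5) ' ') &&
  (PySem.List.pyGetD cs (l+5) ' ' != PySem.List.pyGetD cs (l+6) ' ') &&
  (PySem.List.pyGetD cs (l+6) ' ' != PySem.List.pyGetD cs (l+7) ' ') &&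
  (PySem.List.pyGetD cs (l+7) ' ' != PySem.List.pyGetD cs (l+8) ' ') &&
  (PySem.List.pyGetD cs (l+8) ' ' == PySem.List.pyGetD cs (l+9) ' ')

-- A's 'for l in range(len(word)-9)' loop with early return
def pvALoop (cs : List Char) : List Int → Bool
  | [] => false
  | l :: rest => if pvCondA cs l then true else pvALoop cs rest

def three_double_two_between (word : String) : Bool :=
  let cs := word.toList
  pvALoop cs (PySem.List.pyRange 0 ((cs.length : Int) - 9) 1)

-- ===== PORT B =====
-- the six separating-letter inequality tests B performs at anchor i
def pvCondDiff (cs : List Char) (i : Int) : Bool :=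
  (PySem.List.pyGetD cs (i+1) ' ' != PySem.List.pyGetD cs (i+2) ' ') &&
  (PySem.List.pyGetD cs (i+2) ' ' != PySem.List.pyGetD cs (i+3) ' ') &&
  (PySem.List.pyGetD cs (i+3) ' ' != PySem.List.pyGetD cs (i+4) ' ') &&
  (PySem.List.pyGetD cs (i+5) ' ' != PySem.List.pyGetD cs (i+6) ' ') &&
  (PySem.List.pyGetD cs (i+6) ' ' != PySem.List.pyGetD cs (i+7) ' ') &&
  (PySem.List.pyGetD cs (i+7) ' ' != PySem.List.pyGetD cs (i+8) ' ')

-- B's 'for i in anchor_list' loop with early return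
def pvBLoop (cs : List Char) (anchors : PySem.Set Int) : List Int → Bool
  | [] => false
  | i :: rest =>
      if PySem.Set.contains anchors (i+4) && PySem.Set.contains anchors (i+8) &&
         pvCondDiff cs i then true
      else pvBLoop cs anchors rest

def three_double_two_between_alt (word : String) : Bool :=
  let cs := word.toList
  let n : Int := cs.length
  let anchorList := (PySem.List.pyRange 0 (n - 1) 1).filter
      (fun i => PySem.List.pyGetD cs i ' ' == PySem.List.pyGetD cs (i+1) ' ')
  let anchors := PySem.Set.ofList anchorList
  pvBLoop cs anchors anchorList

-- ===== PRECONDITION & SPEC =====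
def Spec_three_double_two_between (word : String) (out : Bool) : Prop := out = three_double_two_between_alt word
instance (word : String) (out : Bool) : Decidable (Spec_three_double_two_between word out) := by unfold Spec_three_double_two_between; infer_instance

-- ===== CLAIM (what is proved, stated in full; the proofs are below) =====
def Claim_equal_three_double_two_between : Prop := ∀ (word : String), Dom_three_double_two_between word → Spec_three_double_two_between word (three_double_two_between word)

-- ===== LEMMAS AND PROOFS =====
theorem pvALoop_eq_any (cs : List Char) (L : List Int) :
    pvALoop cs L = L.any (pvCondA cs) := by
  induction L with
  | nil => rfl
  | cons l rest ih => cases h : pvCondA cs l <;> simp [pvALoop, h, ih]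

theorem pvBLoop_eq_any (cs : List Char) (s : PySem.Set Int) (L : List Int) :
    pvBLoop cs s L = L.any (fun i =>
      PySem.Set.contains s (i+4) && PySem.Set.contains s (i+8) && pvCondDiff cs i) := by
  induction L with
  | nil => rfl
  | cons i rest ih =>
      simp only [pvBLoop, List.any_cons, ih]
      cases (PySem.Set.contains s (i+4) && PySem.Set.contains s (i+8) && pvCondDiff cs i) <;> simp

-- ===== VERDICT (by name: the statement is the Claim_ definition above) =====
theorem three_double_two_between_spec : Claim_equal_three_double_two_between := by
  intro word _
  unfold Spec_three_double_two_between three_double_two_between three_double_two_between_alt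
  set cs := word.toList with hcs
  set n : Int := (cs.length : Int) with hn
  rw [pvALoop_eq_any, pvBLoop_eq_any]
  simp only [List.any_filter]
  apply Bool.coe_iff_coe.mp
  simp only [List.any_eq_true, List.mem_filter, PySem.List.mem_pyRange_one,
    PySem.Set.contains_iff, PySem.Set.mem_ofList, Bool.and_eq_true]
  constructor
  · rintro ⟨l, ⟨hl0, hl9⟩, hc⟩
    simp only [pvCondA, Bool.and_eq_true] at hc
    obtain ⟨⟨⟨⟨⟨⟨⟨⟨h1, h2⟩, h3⟩, h4⟩, h5⟩, h6⟩, h7⟩, h8⟩, h9⟩ := hc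
    refine ⟨l, ⟨hl0, by omega⟩, h1,
      ⟨⟨⟨by omega, by omega⟩, by rw [show l + 4 + 1 = l + 5 from by ring]; exact h5⟩,
        ⟨by omega, by omega⟩, by rw [show l + 8 + 1 = l + 9 from by ring]; exact h9⟩, ?_⟩
    simp only [pvCondDiff, Bool.and_eq_true]
    exact ⟨⟨⟨⟨⟨h2, h3⟩, h4⟩, h6⟩, h7⟩, h8⟩
  · rintro ⟨i, ⟨hi0, _⟩, h1, ⟨⟨_, h5⟩, ⟨_, hi8⟩, h9⟩, hd⟩
    simp only [pvCondDiff, Bool.and_eq_true] at hd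
    obtain ⟨⟨⟨⟨⟨h2, h3⟩, h4⟩, h6⟩, h7⟩, h8⟩ := hd
    rw [show i + 4 + 1 = i + 5 from by ring] at h5
    rw [show i + 8 + 1 = i + 9 from by ring] at h9
    refine ⟨i, ⟨hi0, by omega⟩, ?_⟩
    simp only [pvCondA, Bool.and_eq_true]
    exact ⟨⟨⟨⟨⟨⟨⟨⟨h1, h2⟩, h3⟩, h4⟩, h5⟩, h6⟩, h7⟩, h8⟩, h9⟩
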